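-- pv_equiv track=rewrite | github.com/dachin-ai/anti-gravity | backend/services/socmed_scraping_logic.py | parse_links_from_textarea
-- ===== SOURCE A (Python) =====
-- from typing import Any, Dict, List, Optional
--
-- def parse_links_from_textarea(raw_text: str) -> List[str]:
--     lines = [x.rstrip() for x in (raw_text or "").splitlines() if x.strip()]
--     merged: List[str] = []
--     for line in lines:
--         s = line.strip()
--         if s.lower().startswith("http"):
--             merged.append(s)
--         else:
--             if merged:
--                 merged[-1] = merged[-1] + s
--     return [x.strip() for x in merged if x.strip()]
-- ===== SOURCE B (Python) =====
-- from typing import List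
--
-- def parse_links_from_textarea(raw_text: str) -> List[str]:
--     stripped = [x.strip() for x in (raw_text or "").splitlines() if x.strip()]
--     out: List[str] = []
--     i, n = 0, len(stripped)
--     while i < n:
--         if not stripped[i].lower().startswith("http"):
--             i += 1          # line before the first link: dropped
--             continue
--         j = i + 1           # scan the continuation lines of this segment
--         while j < n and not stripped[j].lower().startswith("http"):
--             j += 1
--         out.append(stripped[i] + "".join(stripped[i + 1:j]))
--         i = j
--     return out
-- ===== Notes on version B (the rewrite author's own statement) =====
-- stated objective: alternative
-- what changed: Replaces A's single fold that appends to merged or mutates merged[-1] in place with a recursive decomposition that splits the cleaned lines into segments starting at each http line and joins each whole segment at once.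
import Mathlib
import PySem

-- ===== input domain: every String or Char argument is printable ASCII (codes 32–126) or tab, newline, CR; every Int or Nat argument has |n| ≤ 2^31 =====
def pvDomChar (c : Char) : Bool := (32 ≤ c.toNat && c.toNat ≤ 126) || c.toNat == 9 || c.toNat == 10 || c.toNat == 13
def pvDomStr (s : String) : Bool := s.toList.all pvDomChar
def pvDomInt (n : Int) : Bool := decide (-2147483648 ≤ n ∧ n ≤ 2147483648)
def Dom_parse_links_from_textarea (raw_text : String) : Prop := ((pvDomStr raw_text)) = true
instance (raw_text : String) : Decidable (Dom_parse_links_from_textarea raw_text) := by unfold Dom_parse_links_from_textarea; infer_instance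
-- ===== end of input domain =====

-- B replaces A's fold that appends to merged or mutates merged[-1] in place by a two-pointer scan
-- that cuts the cleaned lines into segments (one per http line) and joins each segment at once;
-- objective: alternative decomposition, same cost.

-- ===== PORT A =====
-- shared transliteration of Python's  s.lower().startswith("http")
def pvHttpStart (s : List Char) : Bool :=
  PySem.Chars.startswith (PySem.Chars.lower s) "http".toList

-- the body of A's for-loop over lines (merged[-1] ported via PySem.List.pyGetD merged (-1))
def pvMergeStep (merged : List (List Char)) (line : List Char) : List (List Char) :=
  let s := PySem.Chars.strip line
  if pvHttpStart s then
    merged ++ [s]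
  else
    if !merged.isEmpty then
      merged.dropLast ++ [PySem.List.pyGetD merged (-1) [] ++ s]
    else merged

def parse_links_from_textarea (raw_text : String) : List String :=
  let lines : List (List Char) :=
    (((PySem.Str.splitlines (if raw_text = "" then "" else raw_text)).map String.toList).filter
      (fun x => !(PySem.Chars.strip x).isEmpty)).map PySem.Chars.rstrip
  let merged : List (List Char) := lines.foldl pvMergeStep []
  ((merged.filter (fun x => !(PySem.Chars.strip x).isEmpty)).map PySem.Chars.strip).map String.ofList

-- ===== PORT B =====
-- B's inner while loop: how many continuation (non-http) lines follow the current line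
def pvScan (rest : List (List Char)) : Nat :=
  match rest with
  | [] => 0
  | r :: rs => if !pvHttpStart r then pvScan rs + 1 else 0

-- B's outer while loop; the cursor i is represented by the list of lines not yet consumed
def pvSegLoop (items : List (List Char)) (out : List (List Char)) : List (List Char) :=
  match items with
  | [] => out
  | head :: rest =>
    if !pvHttpStart head then
      pvSegLoop rest out
    else
      pvSegLoop (rest.drop (pvScan rest))
        (out ++ [head ++ PySem.Chars.join [] (rest.take (pvScan rest))])
termination_by items.length
decreasing_by
  · simp only [List.length_cons]; omega
  · simp only [List.length_drop, List.length_cons]; omega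

def parse_links_from_textarea_alt (raw_text : String) : List String :=
  let stripped : List (List Char) :=
    (((PySem.Str.splitlines (if raw_text = "" then "" else raw_text)).map String.toList).filter
      (fun x => !(PySem.Chars.strip x).isEmpty)).map PySem.Chars.strip
  (pvSegLoop stripped []).map String.ofList

-- ===== PRECONDITION & SPEC =====
def Spec_parse_links_from_textarea (raw_text : String) (out : List String) : Prop := out = parse_links_from_textarea_alt raw_text
instance (raw_text : String) (out : List String) : Decidable (Spec_parse_links_from_textarea raw_text out) := by unfold Spec_parse_links_from_textarea; infer_instance

-- ===== CLAIM (what is proved, stated in full; the proofs are below) =====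
def Claim_equal_parse_links_from_textarea : Prop := ∀ (raw_text : String), Dom_parse_links_from_textarea raw_text → Spec_parse_links_from_textarea raw_text (parse_links_from_textarea raw_text)

-- ===== LEMMAS AND PROOFS =====

-- cons-form of the segment decomposition, used only in the proofs
def pvSegments (items : List (List Char)) : List (List Char) :=
  match items with
  | [] => []
  | head :: rest =>
    if !pvHttpStart head then
      pvSegments rest
    else
      (head ++ PySem.Chars.join [] (rest.take (pvScan rest))) :: pvSegments (rest.drop (pvScan rest))
termination_by items.length
decreasing_by
  · simp only [List.length_cons]; omega
  · simp only [List.length_drop, List.length_cons]; omega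

lemma pvSegments_nil : pvSegments [] = [] := by
  simp only [pvSegments]

lemma pvSegments_cons (head : List Char) (rest : List (List Char)) :
    pvSegments (head :: rest) =
      if !pvHttpStart head then pvSegments rest
      else (head ++ PySem.Chars.join [] (rest.take (pvScan rest))) :: pvSegments (rest.drop (pvScan rest)) := by
  simp only [pvSegments]

lemma pvSegLoop_nil (out : List (List Char)) : pvSegLoop [] out = out := by
  simp only [pvSegLoop]

lemma pvSegLoop_cons (head : List Char) (rest : List (List Char)) (out : List (List Char)) :
    pvSegLoop (head :: rest) out =
      if !pvHttpStart head then pvSegLoop rest out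
      else pvSegLoop (rest.drop (pvScan rest))
        (out ++ [head ++ PySem.Chars.join [] (rest.take (pvScan rest))]) := by
  simp only [pvSegLoop]

-- pvSegLoop is pvSegments with an accumulator
lemma pv_segLoop_eq_aux : ∀ (n : Nat) (items : List (List Char)), items.length ≤ n →
    ∀ (out : List (List Char)), pvSegLoop items out = out ++ pvSegments items := by
  intro n
  induction n with
  | zero =>
    intro items hlen out
    have : items = [] := List.eq_nil_of_length_eq_zero (Nat.le_zero.mp hlen)
    subst this
    simp [pvSegLoop_nil, pvSegments_nil]
  | succ n ih =>
    intro items hlen out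
    cases items with
    | nil => simp [pvSegLoop_nil, pvSegments_nil]
    | cons head rest =>
      rw [pvSegLoop_cons, pvSegments_cons]
      by_cases hp : pvHttpStart head = true
      · simp only [hp, Bool.not_true, Bool.false_eq_true, if_false]
        rw [ih (rest.drop (pvScan rest)) (by simp only [List.length_drop]; simp at hlen; omega)]
        simp [List.append_assoc]
      · have hp' : pvHttpStart head = false := by revert hp; cases pvHttpStart head <;> simp
        simp only [hp', Bool.not_false, if_true]
        exact ih rest (by simp at hlen; omega) out

lemma pv_segLoop_eq (items : List (List Char)) :
    pvSegLoop items [] = pvSegments items := by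
  simpa using pv_segLoop_eq_aux items.length items le_rfl []

-- ---------- generic dropWhile facts ----------

lemma pv_dropWhile_head_false {α : Type} {p : α → Bool} {l : List α} (hne : l ≠ [])
    (h : p (l.head hne) = false) : List.dropWhile p l = l := by
  cases l with
  | nil => rfl
  | cons c t =>
    simp only [List.head_cons] at h
    rw [List.dropWhile_cons, h]
    simp

lemma pv_dropWhile_idem {α : Type} (p : α → Bool) (l : List α) :
    List.dropWhile p (List.dropWhile p l) = List.dropWhile p l := by
  by_cases hn : List.dropWhile p l = []
  · rw [hn]; rfl
  · exact pv_dropWhile_head_false hn (List.head_dropWhile_not p hn)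

-- ---------- strip / lstrip / rstrip facts ----------

lemma pv_rstrip_prefix (l : List Char) : PySem.Chars.rstrip l <+: l := by
  have h : List.dropWhile PySem.Chars.isspace l.reverse <:+ l.reverse :=
    List.dropWhile_suffix _
  have h2 := List.reverse_prefix.mpr h
  simpa [PySem.Chars.rstrip] using h2

lemma pv_rstrip_len_le (l : List Char) : (PySem.Chars.rstrip l).length ≤ l.length := by
  simpa [PySem.Chars.rstrip] using List.length_dropWhile_le PySem.Chars.isspace l.reverse

lemma pv_rstrip_idem (l : List Char) :
    PySem.Chars.rstrip (PySem.Chars.rstrip l) = PySem.Chars.rstrip l := by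
  simp only [PySem.Chars.rstrip, List.reverse_reverse]
  rw [pv_dropWhile_idem]

lemma pv_lstrip_idem (l : List Char) :
    PySem.Chars.lstrip (PySem.Chars.lstrip l) = PySem.Chars.lstrip l := by
  simp only [PySem.Chars.lstrip]
  rw [pv_dropWhile_idem]

lemma pv_lstrip_rstrip_comm (l : List Char) :
    PySem.Chars.lstrip (PySem.Chars.rstrip l) = PySem.Chars.rstrip (PySem.Chars.lstrip l) := by
  by_cases hy : List.dropWhile PySem.Chars.isspace l = []
  · have hall : ∀ x ∈ l, PySem.Chars.isspace x = true := List.dropWhile_eq_nil_iff.mp hy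
    have hrev : List.dropWhile PySem.Chars.isspace l.reverse = [] :=
      List.dropWhile_eq_nil_iff.mpr (fun x hx => hall x (List.mem_reverse.mp hx))
    simp [PySem.Chars.lstrip, PySem.Chars.rstrip, hy, hrev]
  · obtain ⟨c, t, hct⟩ := List.exists_cons_of_ne_nil hy
    have hc : PySem.Chars.isspace c = false := by
      have hidem := pv_dropWhile_idem PySem.Chars.isspace l
      rw [hct] at hidem
      cases hpc : PySem.Chars.isspace c with
      | false => rfl
      | true =>
        rw [List.dropWhile_cons, hpc] at hidem
        simp only [if_true] at hidem
        have hle := List.length_dropWhile_le PySem.Chars.isspace t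
        rw [hidem] at hle
        simp at hle
    have hl : l = List.takeWhile PySem.Chars.isspace l ++ (c :: t) := by
      rw [← hct, List.takeWhile_append_dropWhile]
    have hallA : ∀ x ∈ List.takeWhile PySem.Chars.isspace l, PySem.Chars.isspace x = true :=
      fun x hx => List.mem_takeWhile_imp hx
    have hA0 : List.dropWhile PySem.Chars.isspace (List.takeWhile PySem.Chars.isspace l) = [] :=
      List.dropWhile_eq_nil_iff.mpr hallA
    have hArev : List.dropWhile PySem.Chars.isspace (List.takeWhile PySem.Chars.isspace l).reverse = [] :=
      List.dropWhile_eq_nil_iff.mpr (fun x hx => hallA x (List.mem_reverse.mp hx))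
    have hRHS : PySem.Chars.rstrip (PySem.Chars.lstrip l) = PySem.Chars.rstrip (c :: t) := by
      simp only [PySem.Chars.lstrip, hct]
    by_cases hr : List.dropWhile PySem.Chars.isspace (c :: t).reverse = []
    · exfalso
      have hall := List.dropWhile_eq_nil_iff.mp hr
      have hcc := hall c (by simp)
      rw [hc] at hcc
      exact Bool.false_ne_true hcc
    · have h1 : PySem.Chars.rstrip l =
          List.takeWhile PySem.Chars.isspace l ++ PySem.Chars.rstrip (c :: t) := by
        simp only [PySem.Chars.rstrip]
        conv_lhs => rw [hl]
        rw [List.reverse_append, List.dropWhile_append]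
        simp only [List.isEmpty_iff, hr, if_false]
        rw [List.reverse_append, List.reverse_reverse]
      have hne : PySem.Chars.rstrip (c :: t) ≠ [] := by
        simp only [PySem.Chars.rstrip, ne_eq, List.reverse_eq_nil_iff]
        exact hr
      obtain ⟨d, u, hdu⟩ := List.exists_cons_of_ne_nil hne
      have hdc : d = c := by
        have hpre := pv_rstrip_prefix (c :: t)
        rw [hdu] at hpre
        obtain ⟨w, hw⟩ := hpre
        simp only [List.cons_append, List.cons.injEq] at hw
        exact hw.1
      subst hdc
      rw [h1, hRHS, hdu]
      simp only [PySem.Chars.lstrip, List.dropWhile_append, hA0, List.isEmpty_nil, if_true]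
      rw [List.dropWhile_cons, hc]
      simp

lemma pv_strip_rstrip (l : List Char) :
    PySem.Chars.strip (PySem.Chars.rstrip l) = PySem.Chars.strip l := by
  simp only [PySem.Chars.strip]
  rw [pv_lstrip_rstrip_comm, pv_rstrip_idem]

lemma pv_strip_idem (l : List Char) :
    PySem.Chars.strip (PySem.Chars.strip l) = PySem.Chars.strip l := by
  simp only [PySem.Chars.strip]
  rw [pv_lstrip_rstrip_comm, pv_lstrip_idem, pv_rstrip_idem]

lemma pv_strip_eq_lstrip_eq {l : List Char} (h : PySem.Chars.strip l = l) :
    PySem.Chars.lstrip l = l := by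
  have hsuf : PySem.Chars.lstrip l <:+ l := List.dropWhile_suffix _
  refine hsuf.eq_of_length ?_
  have h1 := pv_rstrip_len_le (PySem.Chars.lstrip l)
  have h2 : PySem.Chars.rstrip (PySem.Chars.lstrip l) = l := h
  rw [h2] at h1
  have h3 : (PySem.Chars.lstrip l).length ≤ l.length := hsuf.length_le
  omega

lemma pv_strip_eq_rstrip_eq {l : List Char} (h : PySem.Chars.strip l = l) :
    PySem.Chars.rstrip l = l := by
  have hl := pv_strip_eq_lstrip_eq h
  calc PySem.Chars.rstrip l = PySem.Chars.rstrip (PySem.Chars.lstrip l) := by rw [hl]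
    _ = l := h

-- clean strings: already stripped and nonempty
def pvClean (l : List Char) : Prop := PySem.Chars.strip l = l ∧ l ≠ []

lemma pv_clean_append {a b : List Char} (ha : pvClean a) (hb : pvClean b) : pvClean (a ++ b) := by
  obtain ⟨has, hane⟩ := ha
  obtain ⟨hbs, hbne⟩ := hb
  have hla : PySem.Chars.lstrip a = a := pv_strip_eq_lstrip_eq has
  have hrb : PySem.Chars.rstrip b = b := pv_strip_eq_rstrip_eq hbs
  constructor
  · have h1 : PySem.Chars.lstrip (a ++ b) = a ++ b := by
      simp only [PySem.Chars.lstrip] at hla ⊢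
      rw [List.dropWhile_append, hla]
      simp [List.isEmpty_iff, hane]
    have hrevb : List.dropWhile PySem.Chars.isspace b.reverse = b.reverse := by
      have hx : (List.dropWhile PySem.Chars.isspace b.reverse).reverse = b := hrb
      calc List.dropWhile PySem.Chars.isspace b.reverse
          = ((List.dropWhile PySem.Chars.isspace b.reverse).reverse).reverse := by
            rw [List.reverse_reverse]
        _ = b.reverse := by rw [hx]
    have h2 : PySem.Chars.rstrip (a ++ b) = a ++ b := by
      simp only [PySem.Chars.rstrip, List.reverse_append]
      rw [List.dropWhile_append, hrevb]
      simp [List.isEmpty_iff, hbne, List.reverse_append]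
    show PySem.Chars.strip (a ++ b) = a ++ b
    simp only [PySem.Chars.strip]
    rw [h1, h2]
  · intro hcontr
    apply hane
    cases a with
    | nil => rfl
    | cons x xs => simp at hcontr

lemma pv_join_nil_cons (a : List Char) (l : List (List Char)) :
    PySem.Chars.join [] (a :: l) = a ++ PySem.Chars.join [] l := by
  cases l with
  | nil => rw [PySem.Chars.join_singleton, PySem.Chars.join_nil, List.append_nil]
  | cons b l' => rw [PySem.Chars.join_cons_cons]; simp

lemma pv_clean_append_join {c : List Char} {l : List (List Char)} (hc : pvClean c)
    (hl : ∀ x ∈ l, pvClean x) : pvClean (c ++ PySem.Chars.join [] l) := by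
  induction l generalizing c with
  | nil => rw [PySem.Chars.join_nil, List.append_nil]; exact hc
  | cons x l ih =>
    rw [pv_join_nil_cons, ← List.append_assoc]
    exact ih (pv_clean_append hc (hl x (by simp))) (fun y hy => hl y (by simp [hy]))

lemma pv_segments_clean_aux : ∀ (n : Nat) (items : List (List Char)), items.length ≤ n →
    (∀ x ∈ items, pvClean x) → ∀ v ∈ pvSegments items, pvClean v := by
  intro n
  induction n with
  | zero =>
    intro items hlen h v hv
    have : items = [] := List.eq_nil_of_length_eq_zero (Nat.le_zero.mp hlen)
    subst this
    simp [pvSegments_nil] at hv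
  | succ n ih =>
    intro items hlen h v hv
    cases items with
    | nil => simp [pvSegments_nil] at hv
    | cons head rest =>
      rw [pvSegments_cons] at hv
      by_cases hp : pvHttpStart head = true
      · simp only [hp, Bool.not_true, Bool.false_eq_true, if_false] at hv
        rcases List.mem_cons.mp hv with hveq | hvmem
        · rw [hveq]
          exact pv_clean_append_join (h head (by simp))
            (fun x hx => h x (List.mem_cons_of_mem _ (List.take_subset _ _ hx)))
        · exact ih (rest.drop (pvScan rest))
            (by simp only [List.length_drop]; simp at hlen; omega)
            (fun x hx => h x (List.mem_cons_of_mem _ (List.drop_subset _ _ hx))) v hvmem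
      · have hp' : pvHttpStart head = false := by revert hp; cases pvHttpStart head <;> simp
        simp only [hp', Bool.not_false, if_true] at hv
        exact ih rest (by simp at hlen; omega) (fun x hx => h x (List.mem_cons_of_mem _ hx)) v hv

-- ---------- the fold of A computes the segments of B ----------

lemma pv_foldl_step_acc (ts : List (List Char)) (hts : ∀ x ∈ ts, PySem.Chars.strip x = x)
    (acc : List (List Char)) (cur : List Char) :
    ts.foldl pvMergeStep (acc ++ [cur]) =
      acc ++ (cur ++ PySem.Chars.join [] (ts.take (pvScan ts))) :: pvSegments (ts.drop (pvScan ts)) := by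
  induction ts generalizing acc cur with
  | nil => simp [pvScan, pvSegments_nil, PySem.Chars.join_nil]
  | cons t ts ih =>
    have hst : PySem.Chars.strip t = t := hts t (by simp)
    have htl : ∀ x ∈ ts, PySem.Chars.strip x = x := fun x hx => hts x (by simp [hx])
    simp only [List.foldl_cons]
    by_cases hp : pvHttpStart t = true
    · have hstep : pvMergeStep (acc ++ [cur]) t = (acc ++ [cur]) ++ [t] := by
        simp [pvMergeStep, hst, hp]
      rw [hstep, ih htl (acc ++ [cur]) t]
      rw [show pvScan (t :: ts) = 0 from by simp [pvScan, hp]]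
      simp only [List.take_zero, PySem.Chars.join_nil, List.append_nil, List.drop_zero]
      rw [pvSegments_cons]
      simp [hp]
    · have hp' : pvHttpStart t = false := by revert hp; cases pvHttpStart t <;> simp
      have hstep : pvMergeStep (acc ++ [cur]) t = acc ++ [cur ++ t] := by
        simp [pvMergeStep, hst, hp', PySem.List.pyGetD_neg_one_append_singleton]
      rw [hstep, ih htl acc (cur ++ t)]
      rw [show pvScan (t :: ts) = pvScan ts + 1 from by simp [pvScan, hp']]
      rw [List.take_succ_cons, List.drop_succ_cons, pv_join_nil_cons]
      simp [List.append_assoc]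

lemma pv_foldl_step_nil (ts : List (List Char)) (hts : ∀ x ∈ ts, PySem.Chars.strip x = x) :
    ts.foldl pvMergeStep [] = pvSegments ts := by
  induction ts with
  | nil => simp [pvSegments_nil]
  | cons t ts ih =>
    have hst : PySem.Chars.strip t = t := hts t (by simp)
    have htl : ∀ x ∈ ts, PySem.Chars.strip x = x := fun x hx => hts x (by simp [hx])
    simp only [List.foldl_cons]
    by_cases hp : pvHttpStart t = true
    · have hstep : pvMergeStep [] t = [] ++ [t] := by simp [pvMergeStep, hst, hp]
      rw [hstep, pv_foldl_step_acc ts htl [] t, pvSegments_cons]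
      simp [hp]
    · have hp' : pvHttpStart t = false := by revert hp; cases pvHttpStart t <;> simp
      have hstep : pvMergeStep [] t = [] := by simp [pvMergeStep, hst, hp']
      rw [hstep, ih htl, pvSegments_cons]
      simp [hp']

-- ===== VERDICT (by name: the statement is the Claim_ definition above) =====
theorem parse_links_from_textarea_spec : Claim_equal_parse_links_from_textarea := by
  intro raw _
  unfold Spec_parse_links_from_textarea
  simp only [parse_links_from_textarea, parse_links_from_textarea_alt]
  rw [pv_segLoop_eq]
  set F := ((PySem.Str.splitlines (if raw = "" then "" else raw)).map String.toList).filter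
    (fun x => !(PySem.Chars.strip x).isEmpty) with hF
  have hSS : ∀ x ∈ F.map PySem.Chars.strip, PySem.Chars.strip x = x := by
    intro x hx
    obtain ⟨f, hf, rfl⟩ := List.mem_map.mp hx
    exact pv_strip_idem f
  have hclean : ∀ x ∈ F.map PySem.Chars.strip, pvClean x := by
    intro x hx
    obtain ⟨f, hf, rfl⟩ := List.mem_map.mp hx
    refine ⟨pv_strip_idem f, ?_⟩
    have hmem := (List.mem_filter.mp hf).2
    simpa [List.isEmpty_iff] using hmem
  have h1 : (F.map PySem.Chars.rstrip).foldl pvMergeStep []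
      = (F.map PySem.Chars.strip).foldl pvMergeStep [] := by
    rw [List.foldl_map, List.foldl_map]
    congr 1
    funext m x
    simp only [pvMergeStep]
    rw [pv_strip_rstrip, pv_strip_idem]
  rw [h1, pv_foldl_step_nil _ hSS]
  have hseg := pv_segments_clean_aux (F.map PySem.Chars.strip).length _ le_rfl hclean
  have hfil : (pvSegments (F.map PySem.Chars.strip)).filter (fun x => !(PySem.Chars.strip x).isEmpty)
      = pvSegments (F.map PySem.Chars.strip) := by
    refine List.filter_eq_self.mpr (fun v hv => ?_)
    obtain ⟨hs, hne⟩ := hseg v hv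
    simp [hs, hne]
  rw [hfil]
  have hmapstrip : (pvSegments (F.map PySem.Chars.strip)).map PySem.Chars.strip
      = pvSegments (F.map PySem.Chars.strip) := by
    rw [List.map_congr_left (fun v hv => (hseg v hv).1)]
    simp
  rw [hmapstrip]
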